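-- pv_equiv track=rewrite | github.com/siyuchen712/temperature-profile-analysis | !archive/thermal_shock_profile.py | byCycles
-- ===== SOURCE A (Python) =====
-- def byCycles(data):
--     """
--     Reorganizes soak or ramp rate data by cycles instead of TC channels
--     """
--     byCycleData = {}
--     channels = sorted(data.keys())
--
--     ## find longest number of cycles
--     cycles = 0
--     for chan in channels:
--         length = len(data[chan])
--         if length > cycles:
--             cycles = length
--     for i in range(cycles):
--         byCycleData[i+1] = []
--         for chan in channels:
--             try:
--                 byCycleData[i+1].append(data[chan][i])
--             except IndexError:
--                 byCycleData[i+1].append('DNR')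
--     return byCycleData
-- ===== SOURCE B (Python) =====
-- def byCycles(data):
--     """
--     Reorganizes soak or ramp rate data by cycles instead of TC channels
--     """
--     # consume the channel columns one element per cycle: reverse each column
--     # once, then repeatedly pop a row off the column stacks until all are empty
--     stacks = [list(reversed(data[ch])) for ch in sorted(data)]
--     byCycleData = {}
--     i = 0
--     while any(stacks):
--         i += 1
--         byCycleData[i] = [s.pop() if s else 'DNR' for s in stacks]
--     return byCycleData
-- ===== Notes on version B (the rewrite author's own statement) =====
-- stated objective: alternative
-- what changed: Instead of computing the maximum cycle count and random-access indexing every channel list with try/except per cycle, B turns each channel list into a reversed stack once and peels one element off every stack per cycle until all stacks are empty; no length maximum and no index-based access at all.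
import Mathlib
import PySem

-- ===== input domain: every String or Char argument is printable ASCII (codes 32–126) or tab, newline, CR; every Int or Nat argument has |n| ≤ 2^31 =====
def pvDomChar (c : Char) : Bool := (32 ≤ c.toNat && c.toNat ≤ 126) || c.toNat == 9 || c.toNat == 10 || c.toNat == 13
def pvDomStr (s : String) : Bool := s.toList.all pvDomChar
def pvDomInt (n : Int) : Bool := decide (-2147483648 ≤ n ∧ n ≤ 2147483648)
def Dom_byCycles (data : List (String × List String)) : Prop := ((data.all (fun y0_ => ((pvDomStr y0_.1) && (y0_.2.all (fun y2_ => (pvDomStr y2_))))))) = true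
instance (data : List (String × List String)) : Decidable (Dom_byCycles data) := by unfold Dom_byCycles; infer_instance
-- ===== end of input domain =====

-- B drops A's max-length pass and per-cycle random-access indexing with try/except: it turns
-- each channel list into a reversed stack once and peels one element off every stack per
-- cycle until all sts are empty (alternative decomposition; same asymptotic cost).

-- ===== PORT A =====
def byCycles (data : List (String × List String)) : List (Int × List String) :=
  let d := PySem.Dict.ofList data
  let channels := PySem.List.sorted d.keys (fun s => s)
  -- find longest number of cycles
  let cycles : Int := channels.foldl (fun c ch =>
      let length : Int := (d.getD ch []).length
      if length > c then length else c) 0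
  ((PySem.List.pyRange 0 cycles).foldl (fun bd i =>
      channels.foldl (fun bd ch =>
          -- try: append data[chan][i]; except IndexError: append 'DNR'  (pyGetD: none = IndexError)
          bd.modify (i + 1) [] (fun r => r ++ [PySem.List.pyGetD (d.getD ch []) i "DNR"]))
        (bd.insert (i + 1) ([] : List String)))
    PySem.Dict.empty).items

-- ===== PORT B =====
-- termination measure for the while-loop: popping shrinks the total number of stacked items
theorem pvSumDropLe (l : List (List String)) :
    ((l.map List.dropLast).map List.length).sum ≤ (l.map List.length).sum := by
  induction l with
  | nil => simp
  | cons s l ih =>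
    simp only [List.map_cons, List.sum_cons, List.length_dropLast]
    omega

theorem pvSumDropLt (l : List (List String)) (h : l.any (fun s => !s.isEmpty) = true) :
    ((l.map List.dropLast).map List.length).sum < (l.map List.length).sum := by
  induction l with
  | nil => simp at h
  | cons s l ih =>
    simp only [List.map_cons, List.sum_cons, List.length_dropLast]
    simp only [List.any_cons, Bool.or_eq_true] at h
    rcases h with h | h
    · have hs : s ≠ [] := by
        cases s <;> simp_all
      have := pvSumDropLe l
      have : 0 < s.length := List.length_pos_iff.mpr hs
      omega
    · have := ih h
      omega

-- 'while any(stacks): i += 1; byCycleData[i] = [s.pop() if s else "DNR" for s in stacks]'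
def pvPeel (sts : List (List String)) (i : Int) : List (Int × List String) :=
  if h : sts.any (fun s => !s.isEmpty) then
    (i, sts.map (fun s => s.getLastD "DNR")) :: pvPeel (sts.map List.dropLast) (i + 1)
  else []
termination_by List.sum (sts.map List.length)
decreasing_by simpa using pvSumDropLt sts h

def byCycles_alt (data : List (String × List String)) : List (Int × List String) :=
  let d := PySem.Dict.ofList data
  let sts := (PySem.List.sorted d.keys (fun s => s)).map (fun ch => (d.getD ch []).reverse)
  pvPeel sts 1

-- ===== PRECONDITION & SPEC =====
def Spec_byCycles (data : List (String × List String)) (out : List (Int × List String)) : Prop := out = byCycles_alt data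
instance (data : List (String × List String)) (out : List (Int × List String)) : Decidable (Spec_byCycles data out) := by unfold Spec_byCycles; infer_instance

-- ===== CLAIM (what is proved, stated in full; the proofs are below) =====
def Claim_equal_byCycles : Prop := ∀ (data : List (String × List String)), Dom_byCycles data → Spec_byCycles data (byCycles data)

-- ===== LEMMAS AND PROOFS =====

-- every member is at most the foldr-max
theorem pvMemLeMax (l : List Nat) : ∀ a ∈ l, a ≤ l.foldr max 0 := by
  induction l with
  | nil => simp
  | cons x l ih =>
    intro a ha
    rcases List.mem_cons.mp ha with rfl | ha
    · simp only [List.foldr_cons]; omega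
    · have := ih a ha
      simp only [List.foldr_cons]; omega

theorem pvExistsPos (l : List Nat) (h : l.foldr max 0 ≠ 0) : ∃ a ∈ l, a ≠ 0 := by
  induction l with
  | nil => simp at h
  | cons x l ih =>
    simp only [List.foldr_cons] at h
    by_cases hx : x = 0
    · subst hx
      obtain ⟨a, ha, h0⟩ := ih (by omega)
      exact ⟨a, List.mem_cons_of_mem _ ha, h0⟩
    · exact ⟨x, List.mem_cons_self, hx⟩

theorem pvFoldrMaxSwap (l : List Nat) (a x : Nat) :
    l.foldr max (max a x) = max x (l.foldr max a) := by
  induction l with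
  | nil => simp [Nat.max_comm]
  | cons y l ih =>
    simp only [List.foldr_cons, ih]
    omega

-- A's running-max loop over cast lengths is the cast of the foldr max
theorem pvFoldlIteMax (ns : List Nat) (a : Nat) :
    (List.map (Nat.cast : Nat → Int) ns).foldl (fun c l => if l > c then l else c) (a : Int)
      = ((ns.foldr max a : Nat) : Int) := by
  induction ns generalizing a with
  | nil => rfl
  | cons n ns ih =>
    simp only [List.map_cons, List.foldl_cons, List.foldr_cons]
    have h1 : ((if (n : Int) > (a : Int) then (n : Int) else (a : Int))) = ((max a n : Nat) : Int) := by
      split <;> push_cast <;> omega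
    rw [h1, ih (max a n), pvFoldrMaxSwap]

-- max of the decremented lengths is the decremented max
theorem pvMaxSub (l : List Nat) :
    (l.map (fun n => n - 1)).foldr max 0 = l.foldr max 0 - 1 := by
  induction l with
  | nil => simp
  | cons x l ih =>
    simp only [List.map_cons, List.foldr_cons, ih]
    omega

theorem pvGetLastRev (c : List String) (d : String) : c.reverse.getLastD d = c.headD d := by
  cases c with
  | nil => rfl
  | cons h t => simp

theorem pvDropLastRev (c : List String) : c.reverse.dropLast = c.tail.reverse := by
  cases c with
  | nil => rfl
  | cons h t => simp

theorem pvGetDTail (c : List String) (k : Nat) (d : String) :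
    c.tail.getD k d = c.getD (k + 1) d := by
  cases c with
  | nil => rfl
  | cons h t => simp

-- the peel loop over reversed columns produces row k = the k-th entries, padded with DNR
theorem pvPeelEq (N : Nat) : ∀ (cols : List (List String)) (i : Int),
    (cols.map List.length).foldr max 0 = N →
    pvPeel (cols.map List.reverse) i
      = (List.range N).map (fun (k : Nat) => (i + (k : Int), cols.map (fun c => c.getD k "DNR"))) := by
  induction N with
  | zero =>
    intro cols i hN
    rw [pvPeel.eq_def]
    rw [dif_neg]
    · simp
    · simp only [List.any_map, List.any_eq_true, Function.comp]
      rintro ⟨c, hc, hne⟩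
      have hlen : c.length ≤ 0 := by
        have := pvMemLeMax (cols.map List.length) c.length (List.mem_map_of_mem hc)
        omega
      have : c = [] := List.eq_nil_of_length_eq_zero (by omega)
      subst this
      simp at hne
  | succ n ih =>
    intro cols i hN
    have hany : (cols.map List.reverse).any (fun s => !s.isEmpty) = true := by
      obtain ⟨a, ha, h0⟩ := pvExistsPos (cols.map List.length) (by omega)
      obtain ⟨c, hc, rfl⟩ := List.mem_map.mp ha
      simp only [List.any_map, List.any_eq_true, Function.comp]
      refine ⟨c, hc, ?_⟩
      cases c <;> simp_all
    rw [pvPeel.eq_def, dif_pos hany]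
    have hrow : (cols.map List.reverse).map (fun s => s.getLastD "DNR")
        = cols.map (fun c => c.getD 0 "DNR") := by
      rw [List.map_map]
      apply List.map_congr_left
      intro c _
      rw [Function.comp_apply, pvGetLastRev]
      cases c <;> rfl
    have hdrop : (cols.map List.reverse).map List.dropLast
        = (cols.map List.tail).map List.reverse := by
      rw [List.map_map, List.map_map]
      apply List.map_congr_left
      intro c _
      exact pvDropLastRev c
    have htails : ((cols.map List.tail).map List.length).foldr max 0 = n := by
      rw [List.map_map]
      have : (List.length ∘ List.tail) = (fun n => n - 1) ∘ (List.length (α := String)) := by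
        funext c; simp
      rw [this, ← List.map_map, pvMaxSub, hN]
      omega
    rw [hrow, hdrop, ih (cols.map List.tail) (i + 1) htails]
    rw [List.range_succ_eq_map]
    simp only [List.map_cons, List.map_map, Nat.cast_zero, add_zero]
    congr 1
    apply List.map_congr_left
    intro k _
    simp only [Function.comp_apply, Prod.mk.injEq]
    constructor
    · push_cast; ring
    · apply List.map_congr_left
      intro c _
      exact pvGetDTail c k "DNR"

-- the inner channel loop on a dict holding key k collapses to one insert of the built row
theorem pvInner (l : List String) (f : String → String) :
    ∀ (bd : PySem.Dict Int (List String)) (k : Int) (v : List String),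
    l.foldl (fun bd ch => bd.modify k [] (fun r => r ++ [f ch])) (bd.insert k v)
      = bd.insert k (v ++ l.map f) := by
  induction l with
  | nil => intro bd k v; simp
  | cons ch l ih =>
    intro bd k v
    rw [List.foldl_cons,
      show (bd.insert k v).modify k [] (fun r => r ++ [f ch]) = bd.insert k (v ++ [f ch]) by
        simp [PySem.Dict.modify, PySem.Dict.insert_insert_self],
      ih bd k (v ++ [f ch])]
    simp

-- ===== VERDICT (by name: the statement is the Claim_ definition above) =====
theorem byCycles_spec : Claim_equal_byCycles := by
  intro data _
  simp only [Spec_byCycles, byCycles, byCycles_alt]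
  set d := PySem.Dict.ofList data with hd
  set channels := PySem.List.sorted d.keys (fun s => s) with hch
  set cols := channels.map (fun ch => d.getD ch []) with hcols
  set N : Nat := (cols.map List.length).foldr max 0 with hN
  -- A's max-length loop computes N
  have hmax : channels.foldl (fun c ch =>
        if ((d.getD ch []).length : Int) > c then ((d.getD ch []).length : Int) else c) 0
      = (N : Int) := by
    have h1 : channels.foldl (fun c ch =>
          if ((d.getD ch []).length : Int) > c then ((d.getD ch []).length : Int) else c) 0
        = (List.map (Nat.cast : Nat → Int) (channels.map (fun ch => (d.getD ch []).length))).foldl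
            (fun c l => if l > c then l else c) ((0 : Nat) : Int) := by
      rw [List.map_map, List.foldl_map]
      rfl
    rw [h1, pvFoldlIteMax, hN, hcols, List.map_map]
    rfl
  rw [hmax]
  -- the outer loop inserts fresh increasing keys
  have hstep : (fun (bd : PySem.Dict Int (List String)) (i : Int) =>
      channels.foldl (fun bd ch =>
          bd.modify (i + 1) [] (fun r => r ++ [PySem.List.pyGetD (d.getD ch []) i "DNR"]))
        (bd.insert (i + 1) ([] : List String)))
      = fun bd i => bd.insert (i + 1)
          (channels.map (fun ch => PySem.List.pyGetD (d.getD ch []) i "DNR")) := by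
    funext bd i
    rw [pvInner channels (fun ch => PySem.List.pyGetD (d.getD ch []) i "DNR") bd (i + 1) []]
    simp
  rw [hstep]
  have hrange : PySem.List.pyRange 0 (N : Int)
      = (List.range N).map (fun k : Nat => (k : Int)) := PySem.List.pyRange_zero_natCast N
  have hnodup : ((PySem.List.pyRange 0 (N : Int)).map (fun i => i + 1)).Nodup := by
    rw [hrange, List.map_map]
    exact List.nodup_range.map (by intro a b h; simp [Function.comp] at h; omega)
  rw [PySem.Dict.items_foldl_insert_fresh (PySem.List.pyRange 0 (N : Int))
        (fun i => i + 1) _ PySem.Dict.empty (fun a _ => PySem.Dict.contains_empty _) hnodup]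
  simp only [PySem.Dict.empty, List.nil_append]
  -- B's peel of the reversed columns gives the same rows
  rw [show channels.map (fun ch => (d.getD ch []).reverse) = cols.map List.reverse by
      rw [hcols, List.map_map]; rfl,
    pvPeelEq N cols 1 hN.symm, hrange, List.map_map]
  apply List.map_congr_left
  intro k _
  simp only [Function.comp_apply, Prod.mk.injEq]
  constructor
  · ring
  · rw [hcols, List.map_map]
    apply List.map_congr_left
    intro ch _
    simp
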